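-- pv_equiv track=rewrite | github.com/Angel5112/Learning_To_Code | Python/Guias/Problemario1_Estructuras_Control/quadratic_friendship.py | is_quadratic_friendship
-- ===== SOURCE A (Python) =====
-- def is_quadratic_friendship(x: int, y: int) -> bool: # x = 16, y = 13
--
--     squared_x = str(pow(x, 2))
--     squared_y = str(pow(y, 2))
--     is_friendship = False
--     figures_x = 0
--     figures_y = 0
--
--     # Determine quadratic friendship
--
--     for num in squared_x:
--         figures_x += int(num)
--
--     for num in squared_y:
--         figures_y += int(num)
--
--     if figures_x == y and figures_y == x:
--         is_friendship = True
--
--     return is_friendship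
-- ===== SOURCE B (Python) =====
-- def is_quadratic_friendship(x: int, y: int) -> bool:
--     def digit_sum(n: int) -> int:
--         total = 0
--         while n > 0:
--             total += n % 10
--             n //= 10
--         return total
--     return digit_sum(x * x) == y and digit_sum(y * y) == x
-- ===== Notes on version B (the rewrite author's own statement) =====
-- stated objective: idiomatic
-- what changed: Replaces the string conversion of each square and the char-by-char int() accumulation (plus the mutable flag) with an arithmetic digit-sum helper (mod/div while-loop) called twice and a direct boolean expression.
import Mathlib
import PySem

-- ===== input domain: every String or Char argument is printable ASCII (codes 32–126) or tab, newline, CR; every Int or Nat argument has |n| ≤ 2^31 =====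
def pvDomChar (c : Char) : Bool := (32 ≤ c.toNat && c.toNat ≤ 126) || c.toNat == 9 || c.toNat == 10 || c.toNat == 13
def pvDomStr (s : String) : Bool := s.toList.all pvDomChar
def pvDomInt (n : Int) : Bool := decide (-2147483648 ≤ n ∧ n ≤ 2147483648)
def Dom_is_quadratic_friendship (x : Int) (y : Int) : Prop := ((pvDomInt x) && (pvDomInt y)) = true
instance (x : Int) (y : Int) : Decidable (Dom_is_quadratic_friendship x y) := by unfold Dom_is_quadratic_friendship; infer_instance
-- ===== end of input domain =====

-- B replaces A's string conversion + per-character int() loops with an arithmetic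
-- mod/div digit-sum helper and a direct boolean expression (idiomatic, same cost).

-- ===== PORT A =====
-- int(num) on a single char of str(n**2): the chars are always digits, so int never
-- raises here; .getD 0 is unreachable.
def pvCharVal (c : Char) : Int := (PySem.Int.ofChars? [c]).getD 0

def is_quadratic_friendship (x : Int) (y : Int) : Bool :=
  let squared_x := PySem.Int.toChars (x ^ (2 : Nat))   -- str(pow(x, 2)), iterated char by char
  let squared_y := PySem.Int.toChars (y ^ (2 : Nat))
  let is_friendship := false
  let figures_x := squared_x.foldl (fun acc num => acc + pvCharVal num) 0
  let figures_y := squared_y.foldl (fun acc num => acc + pvCharVal num) 0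
  let is_friendship := if figures_x = y ∧ figures_y = x then true else is_friendship
  is_friendship

-- ===== PORT B =====
-- the `while n > 0: total += n % 10; n //= 10` loop of Source B's digit_sum
def pvDigitSumLoop (n : Int) (total : Int) : Int :=
  if _h : 0 < n then
    pvDigitSumLoop (PySem.Int.floordiv n 10) (total + PySem.Int.mod n 10)
  else total
termination_by n.toNat
decreasing_by
  simp only [PySem.Int.floordiv]
  have e : Int.fdiv n 10 = n / 10 := Int.fdiv_eq_ediv_of_nonneg _ (by omega)
  rw [e]; omega

def is_quadratic_friendship_alt (x : Int) (y : Int) : Bool :=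
  (pvDigitSumLoop (x * x) 0 == y) && (pvDigitSumLoop (y * y) 0 == x)

-- ===== PRECONDITION & SPEC =====
def Spec_is_quadratic_friendship (x : Int) (y : Int) (out : Bool) : Prop := out = is_quadratic_friendship_alt x y
instance (x : Int) (y : Int) (out : Bool) : Decidable (Spec_is_quadratic_friendship x y out) := by unfold Spec_is_quadratic_friendship; infer_instance

-- ===== CLAIM (what is proved, stated in full; the proofs are below) =====
def Claim_equal_is_quadratic_friendship : Prop := ∀ (x : Int) (y : Int), Dom_is_quadratic_friendship x y → Spec_is_quadratic_friendship x y (is_quadratic_friendship x y)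

-- ===== LEMMAS AND PROOFS =====

-- reference digit sum on Nat
def pvNatDS (n : Nat) : Int :=
  if _h : n = 0 then 0 else (↑(n % 10) : Int) + pvNatDS (n / 10)
decreasing_by omega

theorem pvNatDS_zero : pvNatDS 0 = 0 := by rw [pvNatDS]; simp

theorem pvNatDS_pos (n : Nat) (h : n ≠ 0) :
    pvNatDS n = (↑(n % 10) : Int) + pvNatDS (n / 10) := by
  rw [pvNatDS]; simp [h]

theorem pvNatDS_small (n : Nat) (h0 : n / 10 = 0) : pvNatDS n = (↑(n % 10) : Int) := by
  by_cases hn : n = 0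
  · subst hn; simp [pvNatDS_zero]
  · rw [pvNatDS_pos n hn, h0, pvNatDS_zero]; ring

theorem pvCharVal_digitChar (d : Nat) (h : d < 10) : pvCharVal d.digitChar = (d : Int) := by
  interval_cases d <;> decide

theorem pvFoldl_add (l : List Char) (i : Int) :
    l.foldl (fun acc num => acc + pvCharVal num) i = i + (l.map pvCharVal).sum := by
  induction l generalizing i with
  | nil => simp
  | cons c t ih => simp [List.foldl_cons, ih (i + pvCharVal c)]; ring

theorem pvToDigitsCore_sum (fuel : Nat) : ∀ (n : Nat) (acc : List Char), n < fuel →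
    ((Nat.toDigitsCore 10 fuel n acc).map pvCharVal).sum
      = pvNatDS n + ((acc.map pvCharVal).sum) := by
  induction fuel with
  | zero => intro n acc h; omega
  | succ f ih =>
    intro n acc h
    simp only [Nat.toDigitsCore]
    by_cases h0 : n / 10 = 0
    · rw [if_pos h0, List.map_cons, List.sum_cons,
        pvCharVal_digitChar (n % 10) (by omega), pvNatDS_small n h0]
    · rw [if_neg h0]
      have hlt : n / 10 < f := by omega
      rw [ih (n / 10) ((n % 10).digitChar :: acc) hlt, List.map_cons, List.sum_cons,
        pvCharVal_digitChar (n % 10) (by omega), pvNatDS_pos n (by omega)]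
      ring

-- A's char-sum of str(m) for m ≥ 0 equals the reference digit sum
theorem pvA_sum (m : Int) (hm : 0 ≤ m) :
    (PySem.Int.toChars m).foldl (fun acc num => acc + pvCharVal num) 0 = pvNatDS m.toNat := by
  rw [pvFoldl_add]
  simp only [PySem.Int.toChars, if_neg (by omega : ¬ m < 0), Nat.toDigits]
  rw [pvToDigitsCore_sum (m.toNat + 1) m.toNat [] (by omega)]
  simp

-- B's loop equals the reference digit sum
theorem pvLoop_eq (n : Nat) : ∀ (total : Int),
    pvDigitSumLoop (n : Int) total = total + pvNatDS n := by
  induction n using Nat.strong_induction_on with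
  | _ n ih =>
    intro total
    by_cases h0 : n = 0
    · subst h0; rw [pvDigitSumLoop]; simp [pvNatDS_zero]
    · rw [pvDigitSumLoop, dif_pos (by omega : (0:Int) < (n:Int))]
      have h10 : PySem.Int.floordiv (n : Int) 10 = ((n / 10 : Nat) : Int) := by
        simp only [PySem.Int.floordiv]
        rw [Int.fdiv_eq_ediv_of_nonneg _ (by omega)]; omega
      have hm : PySem.Int.mod (n : Int) 10 = ((n % 10 : Nat) : Int) := by
        simp only [PySem.Int.mod]
        rw [Int.fmod_eq_emod]; omega
      rw [h10, hm, ih (n / 10) (by omega), pvNatDS_pos n h0]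
      ring

theorem pvB_digitSum (m : Int) (hm : 0 ≤ m) :
    pvDigitSumLoop m 0 = pvNatDS m.toNat := by
  have := pvLoop_eq m.toNat 0
  rw [Int.toNat_of_nonneg hm] at this
  simpa using this

-- ===== VERDICT (by name: the statement is the Claim_ definition above) =====
theorem is_quadratic_friendship_spec : Claim_equal_is_quadratic_friendship := by
  intro x y _
  unfold Spec_is_quadratic_friendship is_quadratic_friendship is_quadratic_friendship_alt
  simp only [pow_two,
    pvA_sum (x * x) (mul_self_nonneg x), pvA_sum (y * y) (mul_self_nonneg y),
    pvB_digitSum (x * x) (mul_self_nonneg x), pvB_digitSum (y * y) (mul_self_nonneg y)]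
  by_cases h1 : pvNatDS (x * x).toNat = y <;> by_cases h2 : pvNatDS (y * y).toNat = x <;>
    simp [h1, h2]
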